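-- pv_equiv track=rewrite | github.com/joshanashakya/dissertation | workspace/dataset/java-python/GeeksForGeeks/425/A/2.py | CntcontSubs
-- ===== SOURCE A (Python) =====
-- def CntcontSubs(a, n):
--     c = 0
--     d = 0
--     sum = 1
--
--     # Iterating through the array
--     for i in range(n):
--
--         # Check if that number can be
--         # expressed as the square of
--         # difference of two numbers
--         if (a[i] % 2 != 0 or a[i] % 4 == 0):
--             d += 1
--
--         # Variable to compute the product
--         sum = a[i]
--
--         # Finding the remaining subsequences
--         for j in range(i + 1, n):
--             sum = sum * a[j]
--
--             # Check if that number can be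
--             # expressed as the square of
--             # difference of two numbers
--             if (sum % 2 != 0 or sum % 4 == 0):
--                 c += 1
--         sum = 1
--
--     # Return the number of subsequences
--     return c + d
-- ===== SOURCE B (Python) =====
-- def CntcontSubs(a, n):
--     # O(n): a subarray's product is 2 mod 4 exactly when the 2-adic "weights"
--     # of its elements (odd -> 0, 2 mod 4 -> 1, divisible by 4 -> 2) sum to 1.
--     # Count those bad subarrays with a running DP over subarrays ending at the
--     # current index, and subtract from the total n*(n+1)//2.
--     if n <= 0:
--         return 0
--     bad = 0
--     c0 = 0  # subarrays ending at current index with weight-sum 0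
--     c1 = 0  # subarrays ending at current index with weight-sum 1
--     for x in a[:n]:
--         if x % 2 != 0:
--             c0, c1 = c0 + 1, c1
--         elif x % 4 != 0:
--             c0, c1 = 0, c0 + 1
--         else:
--             c0, c1 = 0, 0
--         bad += c1
--     return n * (n + 1) // 2 - bad
-- ===== Notes on version B (the rewrite author's own statement) =====
-- stated objective: faster
-- what changed: Replaced A's O(n^2) double loop over all subarray products by a single O(n) pass: each element is classified by its power of 2 (odd/2 mod 4/divisible by 4), a running DP counts subarrays ending at each index whose class-sum is exactly 1 (exactly the subarrays whose product is 2 mod 4), and the answer is n*(n+1)/2 minus that count.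
import Mathlib
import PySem

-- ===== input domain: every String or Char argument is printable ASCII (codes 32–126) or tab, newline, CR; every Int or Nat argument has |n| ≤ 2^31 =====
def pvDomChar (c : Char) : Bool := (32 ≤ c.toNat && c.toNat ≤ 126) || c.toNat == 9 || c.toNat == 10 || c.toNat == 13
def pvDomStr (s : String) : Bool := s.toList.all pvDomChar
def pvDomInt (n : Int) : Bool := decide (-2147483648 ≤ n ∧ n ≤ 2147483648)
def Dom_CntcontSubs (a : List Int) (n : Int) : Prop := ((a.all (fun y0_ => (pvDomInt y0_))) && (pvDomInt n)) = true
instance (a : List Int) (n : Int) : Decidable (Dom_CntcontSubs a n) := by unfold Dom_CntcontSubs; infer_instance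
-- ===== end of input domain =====

-- B replaces A's O(n^2) double loop by one O(n) pass: classify each element by its
-- power of 2, count subarrays whose class-sum is 1 (product ≡ 2 mod 4) with a running
-- DP over subarrays ending at the current index, and subtract from n*(n+1)//2.

-- ===== PORT A =====
def CntcontSubs (a : List Int) (n : Int) : Int :=
  let r := (PySem.List.pyRange 0 n 1).foldl
    (fun (st : Int × Int × Int) i =>
      let ai := PySem.List.pyGetD a i 0
      let d := if PySem.Int.mod ai 2 ≠ 0 ∨ PySem.Int.mod ai 4 = 0 then st.2.1 + 1 else st.2.1
      let inner := (PySem.List.pyRange (i + 1) n 1).foldl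
        (fun (st2 : Int × Int) j =>
          (if PySem.Int.mod (st2.2 * PySem.List.pyGetD a j 0) 2 ≠ 0 ∨
              PySem.Int.mod (st2.2 * PySem.List.pyGetD a j 0) 4 = 0 then st2.1 + 1 else st2.1,
           st2.2 * PySem.List.pyGetD a j 0)) (st.1, ai)
      (inner.1, d, 1)) (0, 0, 1)
  r.1 + r.2.1

-- ===== PORT B =====
def CntcontSubs_alt (a : List Int) (n : Int) : Int :=
  if n ≤ 0 then 0
  else
    let st := (PySem.List.slice a none (some n)).foldl
      (fun (st : Int × Int × Int) x =>
        let p :=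
          if PySem.Int.mod x 2 ≠ 0 then (st.2.1 + 1, st.2.2)
          else if PySem.Int.mod x 4 ≠ 0 then ((0 : Int), st.2.1 + 1)
          else (0, 0)
        (st.1 + p.2, p.1, p.2)) (0, 0, 0)
    PySem.Int.floordiv (n * (n + 1)) 2 - st.1

-- ===== PRECONDITION & SPEC =====
-- A indexes a[i] for i in range(n): it raises IndexError exactly when n > len(a).
def Pre_CntcontSubs (a : List Int) (n : Int) : Prop := n ≤ (a.length : Int)
instance (a : List Int) (n : Int) : Decidable (Pre_CntcontSubs a n) := by unfold Pre_CntcontSubs; infer_instance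
def pvWitness_CntcontSubs : List Int × Int := ([2, 3, 8], 3)

def Spec_CntcontSubs (a : List Int) (n : Int) (out : Int) : Prop := out = CntcontSubs_alt a n
instance (a : List Int) (n : Int) (out : Int) : Decidable (Spec_CntcontSubs a n out) := by unfold Spec_CntcontSubs; infer_instance

-- ===== CLAIM (what is proved, stated in full; the proofs are below) =====
def Claim_equal_CntcontSubs : Prop := ∀ (a : List Int) (n : Int), Dom_CntcontSubs a n → Pre_CntcontSubs a n → Spec_CntcontSubs a n (CntcontSubs a n)

-- ===== LEMMAS AND PROOFS =====

-- weight of x: the class of x's power of 2 (odd -> 0, 2 mod 4 -> 1, 0 mod 4 -> 2)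
def wv (x : Int) : Int := if x % 2 ≠ 0 then 0 else if x % 4 ≠ 0 then 1 else 2

-- number of nonempty prefixes q of l with min(k + weight-sum q, 2) = 1
def B1 (k : Int) : List Int → Int
  | [] => 0
  | y :: r => (if min (k + wv y) 2 = 1 then 1 else 0) + B1 (min (k + wv y) 2) r

def capw (k : Int) (l : List Int) : Int := l.foldl (fun s y => min (s + wv y) 2) k

-- number of nonempty prefixes q of l with the A-condition on s * product q
def prefCnt (s : Int) : List Int → Int
  | [] => 0
  | y :: r => (if (s * y) % 2 ≠ 0 ∨ (s * y) % 4 = 0 then 1 else 0) + prefCnt (s * y) r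

-- A's count, grouped by start index
def refA : List Int → Int
  | [] => 0
  | x :: r => (if x % 2 ≠ 0 ∨ x % 4 = 0 then 1 else 0) + prefCnt x r + refA r

-- number of segments with weight-sum 1, grouped by start index
def badS : List Int → Int
  | [] => 0
  | x :: r => B1 (wv x) r + (if wv x = 1 then 1 else 0) + badS r

lemma pymod2 (z : Int) : PySem.Int.mod z 2 = z % 2 := PySem.Int.mod_eq_emod_of_pos (by norm_num)
lemma pymod4 (z : Int) : PySem.Int.mod z 4 = z % 4 := PySem.Int.mod_eq_emod_of_pos (by norm_num)

lemma wv_nonneg (x : Int) : 0 ≤ wv x := by unfold wv; split_ifs <;> norm_num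
lemma wv_le_two (x : Int) : wv x ≤ 2 := by unfold wv; split_ifs <;> norm_num

set_option maxHeartbeats 1000000 in
lemma wv_mul (s y : Int) : wv (s * y) = min (wv s + wv y) 2 := by
  have h2 : ∀ z : Int, z % 2 = z % 4 % 2 := fun z => (Int.emod_emod_of_dvd z (by norm_num)).symm
  have hs4 : s % 4 = 0 ∨ s % 4 = 1 ∨ s % 4 = 2 ∨ s % 4 = 3 := by omega
  have hy4 : y % 4 = 0 ∨ y % 4 = 1 ∨ y % 4 = 2 ∨ y % 4 = 3 := by omega
  have hm4 : (s * y) % 4 = (s % 4) * (y % 4) % 4 := Int.mul_emod s y 4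
  have hm2 := h2 (s * y); have hs2 := h2 s; have hy2 := h2 y
  unfold wv
  rcases hs4 with h | h | h | h <;> rcases hy4 with g | g | g | g <;>
    rw [h, g] at hm4 <;> norm_num at hm4 <;> split_ifs <;> omega

lemma cond_iff (z : Int) : (z % 2 ≠ 0 ∨ z % 4 = 0) ↔ wv z ≠ 1 := by
  unfold wv; split_ifs <;> simp_all

lemma B1_two : ∀ l : List Int, B1 2 l = 0 := by
  intro l; induction l with
  | nil => rfl
  | cons y r ih =>
    have := wv_nonneg y
    simp only [B1]
    have h : min (2 + wv y) 2 = 2 := by omega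
    rw [h, ih]; omega

lemma prefCnt_eq : ∀ (r : List Int) (s : Int), prefCnt s r = r.length - B1 (wv s) r := by
  intro r; induction r with
  | nil => intro s; simp [prefCnt, B1]
  | cons y r ih =>
    intro s
    simp only [prefCnt, B1, List.length_cons]
    rw [ih (s * y), wv_mul s y]
    by_cases h : min (wv s + wv y) 2 = 1
    · have hnc : ¬ ((s * y) % 2 ≠ 0 ∨ (s * y) % 4 = 0) := by
        rw [cond_iff, wv_mul]; simp [h]
      rw [if_neg hnc, if_pos h]; push_cast; ring
    · have hc : (s * y) % 2 ≠ 0 ∨ (s * y) % 4 = 0 := by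
        rw [cond_iff, wv_mul]; exact h
      rw [if_pos hc, if_neg h]; push_cast; ring

lemma capw_eq : ∀ (l : List Int) (k : Int), 0 ≤ k → k ≤ 2 → capw k l = min (k + (l.map wv).sum) 2 := by
  intro l; induction l with
  | nil => intro k h0 h2; simp [capw]; omega
  | cons y r ih =>
    intro k h0 h2
    have hy0 := wv_nonneg y; have hy2 := wv_le_two y
    have hsum : 0 ≤ (r.map wv).sum := List.sum_nonneg (by intro z hz; simp at hz; obtain ⟨u, _, hu⟩ := hz; rw [← hu]; exact wv_nonneg u)
    simp only [capw, List.foldl_cons, List.map_cons, List.sum_cons]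
    rw [show (r.foldl (fun s y => min (s + wv y) 2) (min (k + wv y) 2)) = capw (min (k + wv y) 2) r from rfl]
    rw [ih _ (by omega) (by omega)]
    omega

lemma B1_append : ∀ (l : List Int) (x k : Int), 0 ≤ k → k ≤ 2 →
    B1 k (l ++ [x]) = B1 k l + (if min (capw k l + wv x) 2 = 1 then 1 else 0) := by
  intro l; induction l with
  | nil => intro x k h0 h2; simp [B1, capw]
  | cons y r ih =>
    intro x k h0 h2
    have hy0 := wv_nonneg y; have hy2 := wv_le_two y
    simp only [List.cons_append, B1]
    rw [ih x _ (by omega) (by omega)]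
    have hc : capw k (y :: r) = capw (min (k + wv y) 2) r := rfl
    rw [hc]; ring

lemma B1_zero_cons (x : Int) (r : List Int) :
    B1 0 (x :: r) = (if wv x = 1 then 1 else 0) + B1 (wv x) r := by
  have h0 := wv_nonneg x; have h2 := wv_le_two x
  simp only [B1]
  have : min (0 + wv x) 2 = wv x := by omega
  rw [this]

lemma badS_append : ∀ (l : List Int) (x : Int), badS (l ++ [x]) = badS l + B1 0 (x :: l.reverse) := by
  intro l; induction l with
  | nil => intro x; simp [badS, B1_zero_cons]; ring
  | cons y r ih =>
    intro x
    have hy0 := wv_nonneg y; have hy2 := wv_le_two y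
    have hx0 := wv_nonneg x; have hx2 := wv_le_two x
    have hrs : 0 ≤ (r.map wv).sum :=
      List.sum_nonneg (by intro u hu; simp at hu; obtain ⟨v, _, hv⟩ := hu; rw [← hv]; exact wv_nonneg v)
    simp only [List.cons_append, badS, List.reverse_cons]
    rw [B1_append r x (wv y) (by omega) (by omega), ih x]
    rw [show x :: (r.reverse ++ [y]) = (x :: r.reverse) ++ [y] from rfl]
    rw [B1_append (x :: r.reverse) y 0 (by norm_num) (by norm_num)]
    rw [B1_zero_cons x r.reverse]
    rw [capw_eq r (wv y) (by omega) (by omega), capw_eq (x :: r.reverse) 0 (by norm_num) (by norm_num)]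
    simp only [List.map_cons, List.sum_cons, List.map_reverse, List.sum_reverse]
    have e1 : min (min (wv y + (r.map wv).sum) 2 + wv x) 2
        = min (min (0 + (wv x + (r.map wv).sum)) 2 + wv y) 2 := by omega
    rw [e1]; ring

lemma badS_reverse : ∀ l : List Int, badS l.reverse = badS l := by
  intro l; induction l with
  | nil => rfl
  | cons x r ih =>
    rw [List.reverse_cons, badS_append r.reverse x, List.reverse_reverse, ih]
    simp only [badS]
    rw [B1_zero_cons x r]
    ring

lemma twice : ∀ l : List Int, 2 * (refA l + badS l) = l.length * (l.length + 1) := by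
  intro l; induction l with
  | nil => simp [refA, badS]
  | cons x r ih =>
    simp only [refA, badS, List.length_cons]
    rw [prefCnt_eq r x]
    by_cases h : wv x = 1
    · have hnc : ¬ (x % 2 ≠ 0 ∨ x % 4 = 0) := by rw [cond_iff]; simp [h]
      rw [if_neg hnc, if_pos h]
      push_cast; push_cast at ih; linear_combination ih
    · have hc : x % 2 ≠ 0 ∨ x % 4 = 0 := by rw [cond_iff]; exact h
      rw [if_pos hc, if_neg h]
      push_cast; push_cast at ih; linear_combination ih

-- ===== port-to-spec lemmas =====

-- the inner and outer loops of port A, as named folds (definitionally equal to the port's lets)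
def innA (a : List Int) (n j c s : Int) : Int × Int :=
  (PySem.List.pyRange j n 1).foldl
    (fun (st2 : Int × Int) k =>
      (if PySem.Int.mod (st2.2 * PySem.List.pyGetD a k 0) 2 ≠ 0 ∨
          PySem.Int.mod (st2.2 * PySem.List.pyGetD a k 0) 4 = 0 then st2.1 + 1 else st2.1,
       st2.2 * PySem.List.pyGetD a k 0)) (c, s)

def outA (a : List Int) (n i c d s : Int) : Int × Int × Int :=
  (PySem.List.pyRange i n 1).foldl
    (fun (st : Int × Int × Int) i =>
      ((innA a n (i + 1) st.1 (PySem.List.pyGetD a i 0)).1,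
       (if PySem.Int.mod (PySem.List.pyGetD a i 0) 2 ≠ 0 ∨
           PySem.Int.mod (PySem.List.pyGetD a i 0) 4 = 0 then st.2.1 + 1 else st.2.1),
       1)) (c, d, s)

-- the loop body of port B, as a named step function
def stepB (st : Int × Int × Int) (x : Int) : Int × Int × Int :=
  let p :=
    if PySem.Int.mod x 2 ≠ 0 then (st.2.1 + 1, st.2.2)
    else if PySem.Int.mod x 4 ≠ 0 then ((0 : Int), st.2.1 + 1)
    else (0, 0)
  (st.1 + p.2, p.1, p.2)

lemma innA_nil (a : List Int) (n j c s : Int) (h : n ≤ j) : innA a n j c s = (c, s) := by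
  unfold innA; rw [PySem.List.pyRange_one_eq_nil h]; rfl

lemma innA_cons (a : List Int) (n j c s : Int) (h : j < n) :
    innA a n j c s = innA a n (j + 1)
      (if PySem.Int.mod (s * PySem.List.pyGetD a j 0) 2 ≠ 0 ∨
          PySem.Int.mod (s * PySem.List.pyGetD a j 0) 4 = 0 then c + 1 else c)
      (s * PySem.List.pyGetD a j 0) := by
  unfold innA; rw [PySem.List.pyRange_one_cons h]; rfl

lemma outA_nil (a : List Int) (n i c d s : Int) (h : n ≤ i) : outA a n i c d s = (c, d, s) := by
  unfold outA; rw [PySem.List.pyRange_one_eq_nil h]; rfl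

lemma outA_cons (a : List Int) (n i c d s : Int) (h : i < n) :
    outA a n i c d s = outA a n (i + 1)
      (innA a n (i + 1) c (PySem.List.pyGetD a i 0)).1
      (if PySem.Int.mod (PySem.List.pyGetD a i 0) 2 ≠ 0 ∨
          PySem.Int.mod (PySem.List.pyGetD a i 0) 4 = 0 then d + 1 else d)
      1 := by
  unfold outA; rw [PySem.List.pyRange_one_cons h]; rfl

lemma innA_eq (a : List Int) (n : Int) (hn : n ≤ (a.length : Int)) :
    ∀ (m : Nat) (j c s : Int), 0 ≤ j → j + m = n →
    (innA a n j c s).1 = c + prefCnt s ((a.take n.toNat).drop j.toNat) := by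
  intro m; induction m with
  | zero =>
    intro j c s hj hjm
    rw [innA_nil a n j c s (by omega)]
    have hd : (a.take n.toNat).drop j.toNat = [] :=
      List.drop_eq_nil_of_le (by simp [List.length_take]; omega)
    rw [hd]; simp [prefCnt]
  | succ m ih =>
    intro j c s hj hjm
    have hjl : j.toNat < a.length := by omega
    have hjt : j.toNat < (a.take n.toNat).length := by simp [List.length_take]; omega
    have hget : PySem.List.pyGetD a j 0 = a[j.toNat] :=
      PySem.List.pyGetD_eq_getElem a 0 (by omega) (by omega)
    have hdrop : (a.take n.toNat).drop j.toNat = a[j.toNat] :: (a.take n.toNat).drop (j.toNat + 1) := by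
      rw [List.drop_eq_getElem_cons hjt]
      congr 1
      exact List.getElem_take
    have h1 : (j + 1).toNat = j.toNat + 1 := by omega
    rw [innA_cons a n j c s (by omega), ih (j + 1) _ _ (by omega) (by omega), h1, hdrop]
    simp only [prefCnt, pymod2, pymod4, hget]
    split_ifs <;> ring

lemma outA_eq (a : List Int) (n : Int) (hn : n ≤ (a.length : Int)) :
    ∀ (m : Nat) (i c d s : Int), 0 ≤ i → i + m = n →
    (outA a n i c d s).1 + (outA a n i c d s).2.1
      = c + d + refA ((a.take n.toNat).drop i.toNat) := by
  intro m; induction m with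
  | zero =>
    intro i c d s hi him
    rw [outA_nil a n i c d s (by omega)]
    have hd : (a.take n.toNat).drop i.toNat = [] :=
      List.drop_eq_nil_of_le (by simp [List.length_take]; omega)
    rw [hd]; simp [refA]
  | succ m ih =>
    intro i c d s hi him
    have hil : i.toNat < a.length := by omega
    have hit : i.toNat < (a.take n.toNat).length := by simp [List.length_take]; omega
    have hget : PySem.List.pyGetD a i 0 = a[i.toNat] :=
      PySem.List.pyGetD_eq_getElem a 0 (by omega) (by omega)
    have hdrop : (a.take n.toNat).drop i.toNat = a[i.toNat] :: (a.take n.toNat).drop (i.toNat + 1) := by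
      rw [List.drop_eq_getElem_cons hit]
      congr 1
      exact List.getElem_take
    have h1 : (i + 1).toNat = i.toNat + 1 := by omega
    have hinner := innA_eq a n hn m (i + 1) c a[i.toNat] (by omega) (by omega)
    rw [h1] at hinner
    rw [outA_cons a n i c d s (by omega),
        ih (i + 1) _ _ 1 (by omega) (by omega), h1, hget, hinner, hdrop]
    simp only [refA, pymod2, pymod4]
    split_ifs <;> ring

lemma foldB_eq : ∀ (l : List Int),
    l.foldl stepB (0, 0, 0) = (badS l.reverse, B1 1 l.reverse, B1 0 l.reverse) := by
  intro l; induction l using List.reverseRecOn with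
  | nil => simp [badS, B1]
  | append_singleton p x ih =>
    rw [List.foldl_append, ih]
    simp only [List.foldl_cons, List.foldl_nil, List.reverse_append, List.reverse_cons,
      List.reverse_nil, List.nil_append, List.cons_append]
    have h0 := wv_nonneg x; have h2 := wv_le_two x
    have hb2 := B1_two p.reverse
    have hbadS : badS (x :: p.reverse)
        = B1 (wv x) p.reverse + (if wv x = 1 then 1 else 0) + badS p.reverse := rfl
    have hB1z : B1 0 (x :: p.reverse)
        = (if min (0 + wv x) 2 = 1 then 1 else 0) + B1 (min (0 + wv x) 2) p.reverse := rfl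
    have hB11 : B1 1 (x :: p.reverse)
        = (if min (1 + wv x) 2 = 1 then 1 else 0) + B1 (min (1 + wv x) 2) p.reverse := rfl
    unfold stepB
    simp only [pymod2, pymod4]
    by_cases hx2 : x % 2 ≠ 0
    · have hw : wv x = 0 := by unfold wv; rw [if_pos hx2]
      rw [if_pos hx2]
      rw [hbadS, hB1z, hB11, hw]
      norm_num
      try omega
    · push_neg at hx2
      by_cases hx4 : x % 4 ≠ 0
      · have hw : wv x = 1 := by unfold wv; rw [if_neg (by omega), if_pos hx4]
        rw [if_neg (by omega), if_pos hx4]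
        rw [hbadS, hB1z, hB11, hw]
        norm_num [hb2]
        try omega
      · push_neg at hx4
        have hw : wv x = 2 := by unfold wv; rw [if_neg (by omega), if_neg (by omega)]
        rw [if_neg (by omega), if_neg (by omega)]
        rw [hbadS, hB1z, hB11, hw]
        norm_num [hb2]

-- ===== VERDICT (by name: the statement is the Claim_ definition above) =====
theorem CntcontSubs_spec : Claim_equal_CntcontSubs := by
  intro a n _ hpre
  unfold Spec_CntcontSubs
  unfold Pre_CntcontSubs at hpre
  by_cases hn : n ≤ 0
  · have hA : CntcontSubs a n = 0 := by
      unfold CntcontSubs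
      rw [PySem.List.pyRange_one_eq_nil hn]
      rfl
    have hB : CntcontSubs_alt a n = 0 := by
      unfold CntcontSubs_alt
      rw [if_pos hn]
    rw [hA, hB]
  · push_neg at hn
    set t := a.take n.toNat with ht
    have hlen : (t.length : Int) = n := by simp [ht, List.length_take]; omega
    have hA : CntcontSubs a n = 0 + 0 + refA t := by
      have h := outA_eq a n hpre n.toNat 0 0 0 1 (by omega) (by omega)
      simp only [Int.toNat_zero, List.drop_zero] at h
      exact h
    have hB : CntcontSubs_alt a n
        = PySem.Int.floordiv (n * (n + 1)) 2 - (t.foldl stepB (0, 0, 0)).1 := by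
      unfold CntcontSubs_alt
      rw [if_neg (by omega), PySem.List.slice_to a (by omega)]
      rfl
    rw [hA, hB, foldB_eq t]
    have htw := twice t
    have hbr := badS_reverse t
    have hdiv : PySem.Int.floordiv (n * (n + 1)) 2 = refA t + badS t := by
      rw [PySem.Int.floordiv_eq_iff_of_pos (by norm_num)]
      constructor
      · rw [← hlen]; push_cast at htw; omega
      · rw [← hlen]; push_cast at htw; omega
    rw [hdiv, hbr]
    ring
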